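-- pv_equiv track=rewrite | github.com/tru489/biophys_helpers | CoulterFile.py | _get_file_section
-- ===== SOURCE A (Python) =====
-- def _get_file_section(lines, start_marker) -> list:
--     """
--     Given a bracketed section marker, extract the lines of that section
--     from the coulter counter file. The section ends at the next line that
--     looks like a section header (starts with '[' and ends with ']').
--
--     Args:
--         lines (list(str)): lines from coulter counter raw file
--         start_marker (str): bracketed start marker of lines of interest
--
--     Raises:
--         ValueError: start_marker was not found in the file
--
--     Returns:
--         list(str): lines between start_marker and the next section header
--     """
--     start_index = None
--     for i, line in enumerate(lines):
--         if start_marker in line: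
--             start_index = i
--             break
--
--     if start_index is None:
--         raise ValueError(f"Section '{start_marker}' was not found in file.")
--
--     result = []
--     for line in lines[start_index + 1:]:
--         stripped = line.strip()
--         if stripped.startswith('[') and stripped.endswith(']'):
--             break
--         result.append(line)
--     return result
-- ===== SOURCE B (Python) =====
-- def _get_file_section(lines, start_marker):
--     """Two-stage: first partition the whole file into sections (each section
--     headed by a '[...]' line), then look up the first section containing the
--     marker and return its remainder after the marker line."""
--     def _is_header(line):
--         s = line.strip()
--         return s.startswith('[') and s.endswith(']')
--
--     sections = []
--     cur = []
--     for line in lines: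
--         if _is_header(line):
--             sections.append(cur)
--             cur = [line]
--         else:
--             cur.append(line)
--     sections.append(cur)
--
--     for sec in sections:
--         for k, line in enumerate(sec):
--             if start_marker in line:
--                 return sec[k + 1:]
--     raise ValueError(f"Section '{start_marker}' was not found in file.")
-- ===== Notes on version B (the rewrite author's own statement) =====
-- stated objective: alternative
-- what changed: Replaced A's scan-to-marker-then-collect-until-break scheme by a two-stage algorithm: one grouping pass partitions the whole file into header-delimited sections, then a lookup finds the first section containing the marker and returns its remainder after the marker line.
import Mathlib
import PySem

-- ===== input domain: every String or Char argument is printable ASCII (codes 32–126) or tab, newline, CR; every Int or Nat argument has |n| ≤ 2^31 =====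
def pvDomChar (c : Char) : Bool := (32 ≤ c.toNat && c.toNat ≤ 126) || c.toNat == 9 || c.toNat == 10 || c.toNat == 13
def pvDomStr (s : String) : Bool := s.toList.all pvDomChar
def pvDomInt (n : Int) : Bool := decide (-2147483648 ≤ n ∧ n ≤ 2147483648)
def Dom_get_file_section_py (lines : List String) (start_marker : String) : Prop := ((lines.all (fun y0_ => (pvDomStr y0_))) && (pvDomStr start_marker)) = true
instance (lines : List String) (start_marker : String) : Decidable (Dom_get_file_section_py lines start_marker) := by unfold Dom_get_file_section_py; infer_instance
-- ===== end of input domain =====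

-- B replaces A's scan-to-marker-then-collect-until-next-header scheme by a two-stage algorithm
-- (partition the file into header-delimited sections, then look up the marker's section);
-- alternative decomposition, same cost. Pre_ excludes inputs where no line contains
-- start_marker: there A (and B) raise ValueError.


-- ===== PORT A =====
-- first enumerate-with-break loop: index of the first line containing the marker
def pvFindMarker (lines : List String) (m : String) : Option Nat :=
  match lines with
  | [] => none
  | l :: ls => if PySem.Str.isIn m l then some 0 else (pvFindMarker ls m).map (· + 1)

-- second loop: collect lines until the next section header, with break
def pvTakeSection (lines : List String) : List String :=
  match lines with
  | [] => []
  | l :: ls =>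
    let stripped := PySem.Str.strip l
    if PySem.Str.startswith stripped "[" && PySem.Str.endswith stripped "]" then []
    else l :: pvTakeSection ls

def get_file_section_py (lines : List String) (start_marker : String) : List String :=
  match pvFindMarker lines start_marker with
  | none => []  -- Python raises ValueError here; excluded by Pre_
  | some i => pvTakeSection (lines.drop (i + 1))  -- lines[start_index+1:], start_index+1 ≥ 0 so the slice is a drop

-- ===== PORT B =====
def pvIsHeader (l : String) : Bool :=
  let s := PySem.Str.strip l
  PySem.Str.startswith s "[" && PySem.Str.endswith s "]"

-- the grouping loop's body: a header line closes the current section and opens a new one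
def pvStep (st : List (List String) × List String) (l : String) : List (List String) × List String :=
  if pvIsHeader l then (st.1 ++ [st.2], [l]) else (st.1, st.2 ++ [l])

-- 'sections' after the grouping loop, with the trailing 'cur' appended
def pvSplitSections (lines : List String) : List (List String) :=
  let p := lines.foldl pvStep ([], [])
  p.1 ++ [p.2]

-- inner lookup loop: 'return sec[k+1:]' at the first line of sec containing the marker
def pvFindInSeg (seg : List String) (m : String) : Option (List String) :=
  match seg with
  | [] => none
  | l :: ls => if PySem.Str.isIn m l then some ls else pvFindInSeg ls m

-- outer lookup loop over the sections
def pvFindSeg (segs : List (List String)) (m : String) : Option (List String) :=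
  match segs with
  | [] => none
  | s :: ss => match pvFindInSeg s m with
    | some r => some r
    | none => pvFindSeg ss m

def get_file_section_py_alt (lines : List String) (start_marker : String) : List String :=
  (pvFindSeg (pvSplitSections lines) start_marker).getD []  -- none = Python's ValueError; excluded by Pre_

-- ===== PRECONDITION & SPEC =====
-- Pre_ admits exactly the inputs where some line contains the marker; otherwise A raises ValueError.
def Pre_get_file_section_py (lines : List String) (start_marker : String) : Prop :=
  lines.any (fun l => PySem.Str.isIn start_marker l) = true
instance (lines : List String) (start_marker : String) : Decidable (Pre_get_file_section_py lines start_marker) := by unfold Pre_get_file_section_py; infer_instance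

def pvWitness_get_file_section_py : List String × String := (["[X]", "a", "b", "[Y]"], "[X]")

def Spec_get_file_section_py (lines : List String) (start_marker : String) (out : List String) : Prop := out = get_file_section_py_alt lines start_marker
instance (lines : List String) (start_marker : String) (out : List String) : Decidable (Spec_get_file_section_py lines start_marker out) := by unfold Spec_get_file_section_py; infer_instance

-- ===== CLAIM (what is proved, stated in full; the proofs are below) =====
def Claim_equal_get_file_section_py : Prop := ∀ (lines : List String) (start_marker : String), Dom_get_file_section_py lines start_marker → Pre_get_file_section_py lines start_marker → Spec_get_file_section_py lines start_marker (get_file_section_py lines start_marker)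

-- ===== LEMMAS AND PROOFS =====

-- common reference function: A's two loops fused, as an Option
def pvA (lines : List String) (m : String) : Option (List String) :=
  match lines with
  | [] => none
  | l :: ls => if PySem.Str.isIn m l then some (pvTakeSection ls) else pvA ls m

theorem pvA_eq_A (lines : List String) (m : String) :
    get_file_section_py lines m = (pvA lines m).getD [] := by
  induction lines with
  | nil => rfl
  | cons l ls ih =>
    by_cases h : PySem.Chars.isIn m.toList l.toList = true
    · simp [get_file_section_py, pvFindMarker, pvA, PySem.Str.isIn, h]
    · simp only [get_file_section_py, pvFindMarker, pvA, PySem.Str.isIn, h, Bool.false_eq_true,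
        if_false] at *
      cases hf : pvFindMarker ls m with
      | none => simpa [hf] using ih
      | some i => simpa [hf] using ih

-- pvFindSeg distributes over append
theorem pvFindSeg_append (a b : List (List String)) (m : String) :
    pvFindSeg (a ++ b) m =
      match pvFindSeg a m with
      | some r => some r
      | none => pvFindSeg b m := by
  induction a with
  | nil => rfl
  | cons s ss ih =>
    simp only [List.cons_append, pvFindSeg, ih]
    cases pvFindInSeg s m <;> rfl

-- the grouping fold only ever appends to the initial section list
theorem foldl_pvStep_init (ls : List String) (segs : List (List String)) (cur : List String) :
    ls.foldl pvStep (segs, cur) =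
      (segs ++ (ls.foldl pvStep ([], cur)).1, (ls.foldl pvStep ([], cur)).2) := by
  induction ls generalizing segs cur with
  | nil => simp
  | cons l ls ih =>
    by_cases h : pvIsHeader l
    · simp only [List.foldl_cons, pvStep, h, if_true, List.nil_append]
      rw [ih (segs ++ [cur]) [l], ih [cur] [l]]
      simp
    · simp only [List.foldl_cons, pvStep, h, if_false, Bool.false_eq_true]
      exact ih segs (cur ++ [l])

-- search over the grouping-fold result, with current open section cur
def pvS (cur : List String) (ls : List String) (m : String) : Option (List String) :=
  let p := ls.foldl pvStep ([], cur)
  pvFindSeg (p.1 ++ [p.2]) m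

theorem pvS_cons (cur : List String) (l : String) (ls : List String) (m : String) :
    pvS cur (l :: ls) m =
      if pvIsHeader l then
        match pvFindInSeg cur m with
        | some r => some r
        | none => pvS [l] ls m
      else pvS (cur ++ [l]) ls m := by
  by_cases h : pvIsHeader l
  · simp only [pvS, List.foldl_cons, pvStep, h, if_true, List.nil_append]
    rw [foldl_pvStep_init ls [cur] [l]]
    rw [List.append_assoc, pvFindSeg_append [cur] _ m]
    cases hc : pvFindInSeg cur m <;> simp [pvFindSeg, hc]
  · simp [pvS, List.foldl_cons, pvStep, h]

theorem pvFindInSeg_append_some (cur : List String) (l : String) (m : String) (r : List String)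
    (h : pvFindInSeg cur m = some r) :
    pvFindInSeg (cur ++ [l]) m = some (r ++ [l]) := by
  induction cur generalizing r with
  | nil => simp [pvFindInSeg] at h
  | cons c cs ih =>
    by_cases hc : PySem.Chars.isIn m.toList c.toList = true
    · simp [pvFindInSeg, PySem.Str.isIn, hc] at h ⊢
      simp [← h]
    · simp only [pvFindInSeg, PySem.Str.isIn, hc, Bool.false_eq_true, if_false,
        List.cons_append] at h ⊢
      exact ih r h

theorem pvFindInSeg_append_none (cur : List String) (l : String) (m : String)
    (h : pvFindInSeg cur m = none) :
    pvFindInSeg (cur ++ [l]) m = if PySem.Str.isIn m l then some [] else none := by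
  induction cur with
  | nil => simp [pvFindInSeg]
  | cons c cs ih =>
    by_cases hc : PySem.Chars.isIn m.toList c.toList = true
    · simp [pvFindInSeg, PySem.Str.isIn, hc] at h
    · simp only [pvFindInSeg, PySem.Str.isIn, hc, Bool.false_eq_true, if_false,
        List.cons_append] at h ⊢
      exact ih h

-- once the marker was seen in the open section, the lookup returns its remainder
-- extended by the lines up to the next header
theorem pvS_found (ls : List String) (cur : List String) (m : String) (r : List String)
    (h : pvFindInSeg cur m = some r) :
    pvS cur ls m = some (r ++ pvTakeSection ls) := by
  induction ls generalizing cur r with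
  | nil => simp [pvS, pvFindSeg, h, pvTakeSection]
  | cons l ls ih =>
    rw [pvS_cons]
    by_cases hl : pvIsHeader l
    · rw [if_pos hl, h]
      have hts : pvTakeSection (l :: ls) = [] := by
        simp only [pvTakeSection]
        rw [if_pos]
        simpa [pvIsHeader] using hl
      simp [hts]
    · have hts : pvTakeSection (l :: ls) = l :: pvTakeSection ls := by
        simp only [pvTakeSection]
        rw [if_neg]
        simpa [pvIsHeader] using hl
      rw [if_neg hl, ih (cur ++ [l]) (r ++ [l]) (pvFindInSeg_append_some cur l m r h), hts]
      simp

-- before the marker was seen, B's lookup agrees with the fused A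
theorem pvS_not_found (ls : List String) (cur : List String) (m : String)
    (h : pvFindInSeg cur m = none) :
    pvS cur ls m = pvA ls m := by
  induction ls generalizing cur with
  | nil => simp [pvS, pvFindSeg, h, pvA]
  | cons l ls ih =>
    rw [pvS_cons]
    by_cases hl : pvIsHeader l
    · rw [if_pos hl, h]
      by_cases hm : PySem.Chars.isIn m.toList l.toList = true
      · have hf : pvFindInSeg [l] m = some [] := by simp [pvFindInSeg, PySem.Str.isIn, hm]
        rw [pvS_found ls [l] m [] hf]
        simp [pvA, PySem.Str.isIn, hm]
      · have hf : pvFindInSeg [l] m = none := by simp [pvFindInSeg, PySem.Str.isIn, hm]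
        rw [ih [l] hf]
        simp [pvA, PySem.Str.isIn, hm]
    · rw [if_neg hl]
      by_cases hm : PySem.Chars.isIn m.toList l.toList = true
      · have h2 : pvFindInSeg (cur ++ [l]) m = some [] := by
          rw [pvFindInSeg_append_none cur l m h, if_pos (by simpa [PySem.Str.isIn] using hm)]
        rw [pvS_found ls (cur ++ [l]) m [] h2]
        simp [pvA, PySem.Str.isIn, hm]
      · have h2 : pvFindInSeg (cur ++ [l]) m = none := by
          rw [pvFindInSeg_append_none cur l m h, if_neg (by simpa [PySem.Str.isIn] using hm)]
        rw [ih (cur ++ [l]) h2]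
        simp [pvA, PySem.Str.isIn, hm]

theorem pv_main (lines : List String) (m : String) :
    get_file_section_py lines m = get_file_section_py_alt lines m := by
  have hb : pvFindSeg (pvSplitSections lines) m = pvS [] lines m := rfl
  rw [pvA_eq_A, get_file_section_py_alt, hb, pvS_not_found lines [] m rfl]

-- ===== VERDICT (by name: the statement is the Claim_ definition above) =====
theorem get_file_section_py_spec : Claim_equal_get_file_section_py := by
  intro lines m _ _
  unfold Spec_get_file_section_py
  exact pv_main lines m
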